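-- pv_equiv track=rewrite | github.com/Eekhofh/Project-Text-Analysis | assignment1.py | length_distribution
-- ===== SOURCE A (Python) =====
-- def length_distribution(sentences):
--
-- 	dist_dict = {}
-- 	for sent in sentences:
-- 		if len(sent) in dist_dict:
-- 			dist_dict[len(sent)] += 1
-- 		else:
-- 			dist_dict[len(sent)] = 1
--
-- 	return dict(sorted(dist_dict.items()))
-- ===== SOURCE B (Python) =====
-- from itertools import groupby
--
-- def length_distribution(sentences):
--     lengths = sorted(len(sent) for sent in sentences)
--     return {length: sum(1 for _ in group) for length, group in groupby(lengths)}
-- ===== Notes on version B (the rewrite author's own statement) =====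
-- stated objective: alternative
-- what changed: B sorts the list of sentence lengths once and walks consecutive equal runs with itertools.groupby (sort-then-group), instead of A's hash-counting into a dict followed by sorting the items.
import Mathlib
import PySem

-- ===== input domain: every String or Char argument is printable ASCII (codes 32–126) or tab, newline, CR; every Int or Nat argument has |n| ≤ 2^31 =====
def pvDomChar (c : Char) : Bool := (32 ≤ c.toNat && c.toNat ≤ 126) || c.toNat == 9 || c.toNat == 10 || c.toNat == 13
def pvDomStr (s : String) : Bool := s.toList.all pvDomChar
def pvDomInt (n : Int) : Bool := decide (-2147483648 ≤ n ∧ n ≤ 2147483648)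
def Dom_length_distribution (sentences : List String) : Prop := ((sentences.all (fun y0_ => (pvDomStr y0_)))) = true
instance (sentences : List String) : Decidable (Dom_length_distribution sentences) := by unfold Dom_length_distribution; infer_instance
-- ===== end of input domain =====

-- B replaces A's hash-counting-then-sort by sort-the-lengths-then-group-consecutive-runs (alternative decomposition, same result).

-- ===== PORT A =====
-- A: build a counting dict over sentence lengths, then return dict(sorted(items)).
def length_distribution (sentences : List String) : List (Int × Int) :=
  (PySem.Dict.ofList (PySem.List.sorted2
    (sentences.foldl (fun d sent =>
        if d.contains ((PySem.Str.len sent : Int))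
        then d.insert ((PySem.Str.len sent : Int)) (d.getD ((PySem.Str.len sent : Int)) 0 + 1)
        else d.insert ((PySem.Str.len sent : Int)) 1)
      PySem.Dict.empty).items
    (fun p => p.1) (fun p => p.2) false)).items

-- ===== PORT B =====
-- B: itertools.groupby over the sorted length list; runsAux walks one run at a time
-- (cur = current group key, n = ones summed so far in the current group).
def runsAux (cur : Int) (n : Nat) : List Int → List (Int × Int)
  | [] => [(cur, (n : Int))]
  | x :: xs => if x = cur then runsAux cur (n + 1) xs else (cur, (n : Int)) :: runsAux x 1 xs

def length_distribution_alt (sentences : List String) : List (Int × Int) :=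
  match PySem.List.sorted (sentences.map (fun sent => (PySem.Str.len sent : Int))) (fun x => x) false with
  | [] => []
  | h :: t => runsAux h 1 t

-- ===== PRECONDITION & SPEC =====
def Spec_length_distribution (sentences : List String) (out : List (Int × Int)) : Prop := out = length_distribution_alt sentences
instance (sentences : List String) (out : List (Int × Int)) : Decidable (Spec_length_distribution sentences out) := by unfold Spec_length_distribution; infer_instance

-- ===== CLAIM (what is proved, stated in full; the proofs are below) =====
def Claim_equal_length_distribution : Prop := ∀ (sentences : List String), Dom_length_distribution sentences → Spec_length_distribution sentences (length_distribution sentences)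

-- ===== LEMMAS AND PROOFS =====

-- canonical value both ports are proved equal to
def tgt (L : List Int) : List (Int × Int) :=
  (PySem.List.sorted (PySem.Set.ofList L) (fun x => x) false).map (fun k => (k, (L.count k : Int)))

lemma tgt_perm (L M : List Int) (h : L.Perm M) : tgt L = tgt M := by
  unfold tgt
  have hset : (PySem.Set.ofList L).Perm (PySem.Set.ofList M) := by
    rw [List.perm_ext_iff_of_nodup (PySem.Set.nodup_ofList L) (PySem.Set.nodup_ofList M)]
    intro a; simp [PySem.Set.mem_ofList, h.mem_iff]
  rw [PySem.List.sorted_eq_sorted_of_perm _ _ _ (fun a b hab => hab) hset]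
  exact List.map_congr_left (fun k _ => by rw [h.count_eq])

lemma insertBy_congr {α : Type} (b1 b2 : α → α → Bool) (x : α) :
    ∀ ys : List α, (∀ y ∈ ys, b1 x y = b2 x y) →
      PySem.List.insertBy b1 x ys = PySem.List.insertBy b2 x ys := by
  intro ys
  induction ys with
  | nil => intro _; rfl
  | cons y ys ih =>
    intro h
    simp only [PySem.List.insertBy]
    rw [h y (by simp)]
    by_cases hb : b2 x y = true
    · simp [hb]
    · simp only [Bool.not_eq_true] at hb
      simp [hb, ih (fun z hz => h z (by simp [hz]))]

lemma foldl_insertBy_congr {α : Type} (b1 b2 : α → α → Bool) (S : List α)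
    (h : ∀ a ∈ S, ∀ c ∈ S, b1 a c = b2 a c) :
    ∀ (xs acc : List α), (∀ a ∈ xs, a ∈ S) → (∀ c ∈ acc, c ∈ S) →
      xs.foldl (fun acc x => PySem.List.insertBy b1 x acc) acc
        = xs.foldl (fun acc x => PySem.List.insertBy b2 x acc) acc := by
  intro xs
  induction xs with
  | nil => intro acc _ _; rfl
  | cons x xs ih =>
    intro acc hxs hacc
    simp only [List.foldl_cons]
    rw [insertBy_congr b1 b2 x acc (fun y hy => h x (hxs x (by simp)) y (hacc y hy))]
    exact ih _ (fun a ha => hxs a (by simp [ha]))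
      (fun c hc => by
        rcases (PySem.List.mem_insertBy b2 x c acc).1 hc with rfl | hc
        · exact hxs c (by simp)
        · exact hacc c hc)

-- sorted2 with a fst-injective list equals sorted by fst
lemma sorted2_eq_sorted_fst (xs : List (Int × Int))
    (hinj : ∀ a ∈ xs, ∀ c ∈ xs, a.1 = c.1 → a = c) :
    PySem.List.sorted2 xs (fun p => p.1) (fun p => p.2) false
      = PySem.List.sorted xs (fun p => p.1) false := by
  show xs.foldl (fun acc x => PySem.List.insertBy _ x acc) []
      = xs.foldl (fun acc x => PySem.List.insertBy _ x acc) []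
  apply foldl_insertBy_congr _ _ xs _ xs [] (fun a ha => ha) (by simp)
  intro a ha c hc
  by_cases h1 : a.1 < c.1
  · simp [h1]
  · by_cases h2 : c.1 < a.1
    · simp [h2, not_lt_of_gt h2]
    · have : a.1 = c.1 := le_antisymm (not_lt.1 h2) (not_lt.1 h1)
      have hac : a = c := hinj a ha c hc this
      subst hac
      simp

lemma counter_items_eq (L : List Int) :
    (L.foldl (fun d x => if d.contains x then d.insert x (d.getD x 0 + 1) else d.insert x 1)
        PySem.Dict.empty).items
      = (PySem.Set.ofList L).map (fun k => (k, (L.count k : Int))) := by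
  have hfun : (fun (d : PySem.Dict Int Int) (x : Int) =>
      if d.contains x then d.insert x (d.getD x 0 + 1) else d.insert x 1)
      = fun d x => d.insert x (d.getD x 0 + 1) := by
    funext d x
    by_cases h : d.contains x
    · simp [h]
    · simp only [Bool.not_eq_true] at h
      rw [if_neg (by simp [h]), PySem.Dict.getD_of_not_contains d 0 h]
      norm_num
  rw [hfun, PySem.Dict.foldl_insert_getD_add_one_eq_counter, PySem.Dict.items_counter]

-- A's port computes tgt of the length list
lemma portA_eq_tgt (sentences : List String) :
    length_distribution sentences = tgt (sentences.map (fun s => (PySem.Str.len s : Int))) := by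
  unfold length_distribution
  set L := sentences.map (fun s => (PySem.Str.len s : Int)) with hL
  have hfold : sentences.foldl (fun d sent =>
        if d.contains ((PySem.Str.len sent : Int))
        then d.insert ((PySem.Str.len sent : Int)) (d.getD ((PySem.Str.len sent : Int)) 0 + 1)
        else d.insert ((PySem.Str.len sent : Int)) 1)
        (PySem.Dict.empty : PySem.Dict Int Int)
      = L.foldl (fun d x => if d.contains x then d.insert x (d.getD x 0 + 1) else d.insert x 1)
        (PySem.Dict.empty : PySem.Dict Int Int) := by
    rw [hL, List.foldl_map]
  rw [hfold, counter_items_eq]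
  -- the sorted items list
  have hitems_inj : ∀ a ∈ (PySem.Set.ofList L).map (fun k => (k, (L.count k : Int))),
      ∀ c ∈ (PySem.Set.ofList L).map (fun k => (k, (L.count k : Int))), a.1 = c.1 → a = c := by
    intro a ha c hc h1
    simp only [List.mem_map] at ha hc
    obtain ⟨k1, _, rfl⟩ := ha
    obtain ⟨k2, _, rfl⟩ := hc
    simp only at h1
    subst h1; rfl
  rw [sorted2_eq_sorted_fst _ hitems_inj]
  have hsorted : PySem.List.sorted ((PySem.Set.ofList L).map (fun k => (k, (L.count k : Int))))
      (fun p => p.1) false = tgt L := by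
    apply PySem.List.sorted_eq_of_perm_of_pairwise_lt
    · exact (PySem.List.sorted_perm (PySem.Set.ofList L) (fun x => x) false).map _
    · exact List.Pairwise.map _ (fun a b hab => hab) (PySem.List.sorted_ofList_pairwise_lt L)
  rw [hsorted]
  -- dict(ofList) of a fst-nodup pair list returns the same items
  show (PySem.Dict.empty.update (tgt L)).items = tgt L
  have hnodup : ((tgt L).map (fun p => p.1)).Nodup := by
    unfold tgt
    rw [List.map_map]
    have : ((fun p => p.1) ∘ (fun k => (k, (L.count k : Int)))) = id := by funext k; rfl
    rw [this, List.map_id]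
    exact (PySem.List.sorted_ofList_pairwise_lt L).imp (fun h => ne_of_lt h)
  have := PySem.Dict.items_foldl_insert_fresh (tgt L) (fun p => p.1) (fun p => p.2)
    PySem.Dict.empty (fun a _ => PySem.Dict.contains_empty _) hnodup
  show ((tgt L).foldl (fun acc p => acc.insert p.1 p.2) PySem.Dict.empty).items = tgt L
  rw [this]
  simp [PySem.Dict.empty]

-- main run lemma: runsAux over a sorted tail computes tgt of the full multiset
lemma runsAux_eq_tgt : ∀ (M : List Int) (c : Int) (n : Nat),
    (c :: M).Pairwise (· ≤ ·) →
    runsAux c (n + 1) M = tgt (List.replicate (n + 1) c ++ M) := by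
  intro M
  induction M with
  | nil =>
    intro c n _
    simp only [runsAux, List.append_nil]
    unfold tgt
    have hset : PySem.List.sorted (PySem.Set.ofList (List.replicate (n + 1) c)) (fun x => x) false = [c] := by
      apply PySem.List.sorted_eq_of_perm_of_pairwise_lt
      · rw [List.perm_ext_iff_of_nodup (by simp) (PySem.Set.nodup_ofList _)]
        intro a
        simp [PySem.Set.mem_ofList, List.mem_replicate]
      · simp
    rw [hset]
    simp [List.count_replicate]
  | cons x xs ih =>
    intro c n hpair
    simp only [runsAux]
    by_cases hx : x = c
    · subst hx
      rw [if_pos rfl]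
      have hpair' : (x :: xs).Pairwise (· ≤ ·) := hpair.tail
      rw [ih x (n + 1) hpair']
      congr 1
      rw [List.replicate_succ', List.append_assoc, List.singleton_append]
    · rw [if_neg hx]
      have hpairx : (x :: xs).Pairwise (· ≤ ·) := hpair.tail
      rw [ih x 0 hpairx]
      have hrepl : List.replicate (0 + 1) x ++ xs = x :: xs := rfl
      rw [hrepl]
      -- facts: c < everything in x :: xs
      have hcle : ∀ y ∈ x :: xs, c ≤ y := fun y hy => List.rel_of_pairwise_cons hpair hy
      have hcx : c < x := lt_of_le_of_ne (hcle x (by simp)) (fun h => hx h.symm)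
      have hclt : ∀ y ∈ x :: xs, c < y := by
        intro y hy
        rcases List.mem_cons.1 hy with rfl | hy'
        · exact hcx
        · exact lt_of_lt_of_le hcx (List.rel_of_pairwise_cons hpairx hy')
      unfold tgt
      set T := PySem.List.sorted (PySem.Set.ofList (x :: xs)) (fun x => x) false with hT
      have hTmem : ∀ y ∈ T, y ∈ x :: xs := by
        intro y hy
        rw [hT, PySem.List.mem_sorted] at hy
        exact (PySem.Set.mem_ofList _ _).1 hy
      have hset : PySem.List.sorted (PySem.Set.ofList (List.replicate (n + 1) c ++ x :: xs)) (fun x => x) false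
          = c :: T := by
        apply PySem.List.sorted_eq_of_perm_of_pairwise_lt
        · rw [List.perm_ext_iff_of_nodup _ (PySem.Set.nodup_ofList _)]
          · intro a
            simp only [List.mem_cons, PySem.Set.mem_ofList, List.mem_append, List.mem_replicate]
            constructor
            · rintro (rfl | ha)
              · exact Or.inl ⟨Nat.succ_ne_zero n, rfl⟩
              · exact Or.inr (List.mem_cons.1 (hTmem a ha))
            · rintro (⟨_, rfl⟩ | ha)
              · exact Or.inl rfl
              · right
                rw [hT, PySem.List.mem_sorted, PySem.Set.mem_ofList]
                exact List.mem_cons.2 ha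
          · refine List.nodup_cons.2 ⟨fun hc => ?_, ?_⟩
            · exact absurd rfl (ne_of_lt (hclt c (hTmem c hc)))
            · exact (PySem.List.sorted_ofList_pairwise_lt _).nodup
        · refine List.pairwise_cons.2 ⟨fun y hy => hclt y (hTmem y hy), ?_⟩
          exact PySem.List.sorted_ofList_pairwise_lt _
      rw [hset]
      simp only [List.map_cons]
      congr 1
      · -- head: count of c in the whole list is n+1
        have hc0 : (x :: xs).count c = 0 := by
          rw [List.count_eq_zero]
          intro hc
          exact absurd rfl (ne_of_lt (hclt c hc))
        have : (List.replicate (n + 1) c ++ x :: xs).count c = n + 1 := by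
          rw [List.count_append, List.count_replicate]
          simp [hc0]
        rw [this]
      · -- tail: counts of keys > c ignore the replicate prefix
        apply List.map_congr_left
        intro k hk
        have hkc : k ≠ c := ne_of_gt (hclt k (hTmem k hk))
        have : (List.replicate (n + 1) c ++ x :: xs).count k = (x :: xs).count k := by
          rw [List.count_append, List.count_replicate]
          have hck : ¬ c = k := fun h => hkc h.symm
          simp [hck]
        rw [this]

lemma portB_eq_tgt (sentences : List String) :
    length_distribution_alt sentences = tgt (sentences.map (fun s => (PySem.Str.len s : Int))) := by
  unfold length_distribution_alt
  set L := sentences.map (fun s => (PySem.Str.len s : Int)) with hL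
  have hperm := PySem.List.sorted_perm L (fun x => x) false
  cases hS : PySem.List.sorted L (fun x => x) false with
  | nil =>
    have : L = [] := (PySem.List.sorted_eq_nil_iff L (fun x => x) false).1 hS
    rw [this]
    unfold tgt
    simp [PySem.Set.ofList, PySem.List.sorted]
  | cons h t =>
    simp only
    have hpair : (h :: t).Pairwise (· ≤ ·) := by
      rw [← hS]
      exact PySem.List.sorted_pairwise L (fun x => x)
    rw [show runsAux h 1 t = runsAux h (0 + 1) t from rfl, runsAux_eq_tgt t h 0 hpair]
    have hrepl : List.replicate (0 + 1) h ++ t = h :: t := rfl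
    rw [hrepl]
    apply tgt_perm
    have hp := PySem.List.sorted_perm L (fun x => x) false
    rw [hS] at hp
    exact hp

-- ===== VERDICT (by name: the statement is the Claim_ definition above) =====
theorem length_distribution_spec : Claim_equal_length_distribution := by
  intro sentences _
  show length_distribution sentences = length_distribution_alt sentences
  rw [portA_eq_tgt, portB_eq_tgt]
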